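-- pv_equiv track=rewrite | github.com/ChanHoLee275/programmers-coding-test-practice | level2/[3차]-파일명-정렬.py | sortByInt
-- ===== SOURCE A (Python) =====
-- def sortByInt(array):
--     answer = []
--     table = dict()
--     for i in array:
--         number = []
--         flag = 0
--         for j in list(i):
--             if flag == 0 and j.isnumeric():
--                 number.append(j)
--             elif len(number) != 0:
--                 flag = 1
--         if int(''.join(number)) in table.keys():
--             table[int(''.join(number))].append(i)
--         else:
--             table[int(''.join(number))] = [i]
--     keys = list(table.keys())
--     keys.sort()
--     for i in keys:
--         answer += table[i]
--     return answer
-- ===== SOURCE B (Python) =====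
-- def sortByInt(array):
--     # key: the first contiguous run of digits in s (ValueError, like A, if there is none)
--     def key(s):
--         i = 0
--         while i < len(s) and not s[i].isdigit():
--             i += 1
--         j = i
--         while j < len(s) and s[j].isdigit():
--             j += 1
--         return int(s[i:j])
--     return sorted(array, key=key)
-- ===== Notes on version B (the rewrite author's own statement) =====
-- stated objective: idiomatic
-- what changed: Replaces the dict-bucketing pipeline (group strings by their leading digit run in a dict, sort the keys, concatenate the buckets) by a single stable comparison sort of the whole list keyed by that digit run's integer value.
import Mathlib
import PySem

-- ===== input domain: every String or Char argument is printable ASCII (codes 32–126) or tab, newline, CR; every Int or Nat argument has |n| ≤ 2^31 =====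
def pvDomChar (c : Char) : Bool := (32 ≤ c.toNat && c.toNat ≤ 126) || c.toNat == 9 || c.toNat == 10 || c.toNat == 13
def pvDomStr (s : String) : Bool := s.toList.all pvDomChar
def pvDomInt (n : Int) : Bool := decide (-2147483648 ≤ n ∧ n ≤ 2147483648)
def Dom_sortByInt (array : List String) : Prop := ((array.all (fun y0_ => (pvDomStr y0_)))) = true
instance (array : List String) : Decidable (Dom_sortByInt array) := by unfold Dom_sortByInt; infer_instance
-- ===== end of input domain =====

-- B replaces A's dict-bucketing + key-sort + concatenation pipeline by one stable sort keyed by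
-- the leading digit-run's integer value (idiomatic; both raise ValueError on a digitless string).

-- ===== PORT A =====
-- A's inner character loop: collect the first contiguous digit run
-- (j.isnumeric() is ported as isdigit, exact on the ASCII domain)
def pvStepA (st : List Char × Int) (j : Char) : List Char × Int :=
  if st.2 == 0 && PySem.Chars.isdigit j then (st.1 ++ [j], st.2)
  else if st.1.length != 0 then (st.1, 1) else st

def pvNumberA (i : String) : List Char := (i.toList.foldl pvStepA ([], 0)).1

-- int(''.join(number)); `.getD 0` stands for the ValueError on an empty run, excluded by Pre_
def pvKeyA (i : String) : Int := (PySem.Int.ofChars? (pvNumberA i)).getD 0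

def sortByInt (array : List String) : List String :=
  let table := array.foldl (fun (table : PySem.Dict Int (List String)) i =>
    if table.contains (pvKeyA i) then
      table.insert (pvKeyA i) (table.getD (pvKeyA i) [] ++ [i])
    else
      table.insert (pvKeyA i) [i]) PySem.Dict.empty
  let keys := PySem.List.sorted table.keys (fun x => x) false
  keys.foldl (fun answer i => answer ++ table.getD i []) []

-- ===== PORT B =====
-- B's key: skip non-digits, take the digit run, int() of it (`.getD 0` = the ValueError, excluded by Pre_)
def pvKeyB (s : String) : Int :=
  (PySem.Int.ofChars? ((s.toList.dropWhile (fun c => !PySem.Chars.isdigit c)).takeWhile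
      PySem.Chars.isdigit)).getD 0

def sortByInt_alt (array : List String) : List String :=
  PySem.List.sorted array pvKeyB false

-- ===== PRECONDITION & SPEC =====
-- Pre_ excludes exactly the inputs on which the Python A raises ValueError (int('') on a string
-- with no digit); B raises ValueError there too.
def Pre_sortByInt (array : List String) : Prop :=
  ∀ s ∈ array, s.toList.any PySem.Chars.isdigit = true
instance (array : List String) : Decidable (Pre_sortByInt array) := by unfold Pre_sortByInt; infer_instance
def pvWitness_sortByInt : List String := ["img12.png", "2x", "img10 v2"]

def Spec_sortByInt (array : List String) (out : List String) : Prop := out = sortByInt_alt array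
instance (array : List String) (out : List String) : Decidable (Spec_sortByInt array out) := by unfold Spec_sortByInt; infer_instance

-- ===== CLAIM (what is proved, stated in full; the proofs are below) =====
def Claim_equal_sortByInt : Prop := ∀ (array : List String), Dom_sortByInt array → Pre_sortByInt array → Spec_sortByInt array (sortByInt array)

-- ===== LEMMAS AND PROOFS =====

-- A's flag loop, once finished (flag = 1), never changes state again
theorem pvStepA_done (cs : List Char) (n : List Char) :
    cs.foldl pvStepA (n, 1) = (n, 1) := by
  induction cs with
  | nil => rfl
  | cons c cs ih =>
      simp only [List.foldl_cons, pvStepA]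
      split_ifs with h1 h2 <;> simp_all

-- A's flag loop in collecting mode (nonempty run, flag = 0)
theorem pvStepA_collect (cs : List Char) (n : List Char) (h : n ≠ []) :
    cs.foldl pvStepA (n, 0) =
      (n ++ cs.takeWhile PySem.Chars.isdigit,
       if cs.all PySem.Chars.isdigit then 0 else 1) := by
  induction cs generalizing n with
  | nil => simp
  | cons c cs ih =>
      by_cases hc : PySem.Chars.isdigit c = true
      · simp only [List.foldl_cons, pvStepA, hc]
        rw [if_pos (by decide), ih (n ++ [c]) (by simp)]
        simp [hc, List.all_cons]
      · have hc' : PySem.Chars.isdigit c = false := by simpa using hc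
        simp only [List.foldl_cons, pvStepA, hc']
        have hlen : (n.length != 0) = true := by
          simp [List.length_eq_zero_iff, h]
        simp only [Bool.and_false, hlen]
        rw [if_neg (by simp), if_pos trivial, pvStepA_done]
        simp [hc', List.all_cons]

-- A's flag loop computes exactly B's dropWhile/takeWhile digit run
theorem pvNumberA_eq (cs : List Char) :
    (cs.foldl pvStepA ([], 0)).1 =
      (cs.dropWhile (fun c => !PySem.Chars.isdigit c)).takeWhile PySem.Chars.isdigit := by
  induction cs with
  | nil => rfl
  | cons c cs ih =>
      by_cases hc : PySem.Chars.isdigit c = true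
      · simp only [List.foldl_cons, pvStepA, hc]
        rw [if_pos (by decide)]
        rw [show ([] ++ [c] : List Char) = [c] by simp, pvStepA_collect cs [c] (by simp)]
        simp [hc]
      · have hc' : PySem.Chars.isdigit c = false := by simpa using hc
        simp only [List.foldl_cons, pvStepA, hc']
        simpa [List.dropWhile_cons, hc'] using ih

theorem pvKeyA_eq_pvKeyB (s : String) : pvKeyA s = pvKeyB s := by
  unfold pvKeyA pvKeyB pvNumberA
  rw [pvNumberA_eq]

-- insertBy places x after a prefix it does not go before and before the rest
theorem pvInsertBy_split {α : Type} (before : α → α → Bool) (x : α) (l1 l2 : List α)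
    (h1 : ∀ y ∈ l1, before x y = false)
    (h2 : ∀ y, l2.head? = some y → before x y = true) :
    PySem.List.insertBy before x (l1 ++ l2) = l1 ++ x :: l2 := by
  induction l1 with
  | nil =>
      cases l2 with
      | nil => rfl
      | cons h t =>
          simp only [List.nil_append]
          unfold PySem.List.insertBy
          rw [h2 h rfl]
          simp
  | cons a l1 ih =>
      have ha : before x a = false := h1 a (by simp)
      simp only [List.cons_append]
      unfold PySem.List.insertBy
      rw [ha]
      simp only [Bool.false_eq_true, if_false]
      have := ih (fun y hy => h1 y (by simp [hy]))
      rw [this]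

-- stable sort by key = concatenation, in increasing key order, of the per-key filters
theorem pvSorted_eq_grouped (key : String → Int) (xs : List String) :
    PySem.List.sorted xs key false =
      (PySem.List.sorted (PySem.Set.ofList (xs.map key)) (fun x => x) false).flatMap
        (fun k => xs.filter (fun i => key i == k)) := by
  induction xs using List.reverseRecOn with
  | nil => rfl
  | append_singleton xs x ih =>
    have hset : PySem.Set.ofList ((xs ++ [x]).map key)
        = PySem.Set.add (PySem.Set.ofList (xs.map key)) (key x) := by
      rw [PySem.Set.ofList_eq_foldl, PySem.Set.ofList_eq_foldl]
      simp [List.foldl_append]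
    have hKmem : key x ∈ PySem.List.sorted (PySem.Set.ofList ((xs ++ [x]).map key)) (fun x => x) false := by
      rw [PySem.List.mem_sorted, PySem.Set.mem_ofList]
      simp
    obtain ⟨l1, l2, hsplit⟩ := List.append_of_mem hKmem
    have hpw' : (l1 ++ key x :: l2).Pairwise (· < ·) := by
      rw [← hsplit]; exact PySem.List.sorted_ofList_pairwise_lt _
    have h1 : ∀ k ∈ l1, k < key x := by
      intro k hk
      exact (List.pairwise_append.1 hpw').2.2 k hk (key x) (by simp)
    have h2 : ∀ k ∈ l2, key x < k := by
      have := (List.pairwise_append.1 hpw').2.1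
      exact fun k hk => (List.pairwise_cons.1 this).1 k hk
    -- LHS: sorted (xs ++ [x]) = insertBy x (sorted xs)
    rw [PySem.List.sorted_eq_foldl_insertBy (xs ++ [x]) key, List.foldl_append,
        ← PySem.List.sorted_eq_foldl_insertBy xs key]
    simp only [List.foldl_cons, List.foldl_nil]
    rw [ih, hsplit]
    -- per-key filters over xs ++ [x]
    have hgK : (xs ++ [x]).filter (fun i => key i == key x)
        = xs.filter (fun i => key i == key x) ++ [x] := by
      rw [List.filter_append]; simp
    have hg1 : ∀ k ∈ l1, (xs ++ [x]).filter (fun i => key i == k) = xs.filter (fun i => key i == k) := by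
      intro k hk; rw [List.filter_append]
      simp [ne_of_gt (h1 k hk)]
    have hg2 : ∀ k ∈ l2, (xs ++ [x]).filter (fun i => key i == k) = xs.filter (fun i => key i == k) := by
      intro k hk; rw [List.filter_append]
      simp [ne_of_lt (h2 k hk)]
    rw [List.flatMap_append, List.flatMap_cons, List.flatMap_congr hg1, List.flatMap_congr hg2, hgK]
    -- elements of the per-key filters carry their key
    have hmemfilt : ∀ (k : Int) (y : String), y ∈ xs.filter (fun i => key i == k) → key y = k := by
      intro k y hy
      have := List.of_mem_filter hy
      simpa using this
    have hmem1 : ∀ y ∈ l1.flatMap (fun k => xs.filter (fun i => key i == k)), key y < key x := by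
      intro y hy
      obtain ⟨k, hk, hyk⟩ := List.mem_flatMap.1 hy
      rw [hmemfilt k y hyk]; exact h1 k hk
    have hmem2 : ∀ y ∈ l2.flatMap (fun k => xs.filter (fun i => key i == k)), key x < key y := by
      intro y hy
      obtain ⟨k, hk, hyk⟩ := List.mem_flatMap.1 hy
      rw [hmemfilt k y hyk]; exact h2 k hk
    have hins : PySem.List.insertBy (fun a b => decide (key a < key b)) x
          ((l1.flatMap (fun k => xs.filter (fun i => key i == k)) ++ xs.filter (fun i => key i == key x))
            ++ l2.flatMap (fun k => xs.filter (fun i => key i == k)))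
        = (l1.flatMap (fun k => xs.filter (fun i => key i == k)) ++ xs.filter (fun i => key i == key x))
            ++ x :: l2.flatMap (fun k => xs.filter (fun i => key i == k)) := by
      apply pvInsertBy_split
      · intro y hy
        rcases List.mem_append.1 hy with hy1 | hy2
        · simp [not_lt_of_gt (hmem1 y hy1)]
        · simp [hmemfilt (key x) y hy2]
      · intro y hy
        have := List.mem_of_mem_head? hy
        simp [hmem2 y this]
    -- case split: is key x already a key of xs?
    by_cases hc : key x ∈ xs.map key
    · -- old key: the key set is unchanged
      have hadd : PySem.Set.add (PySem.Set.ofList (xs.map key)) (key x)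
          = PySem.Set.ofList (xs.map key) := by
        unfold PySem.Set.add
        rw [if_pos]
        have : key x ∈ PySem.Set.ofList (xs.map key) := (PySem.Set.mem_ofList _ _).2 hc
        unfold PySem.Set.contains
        simpa [List.contains_iff_mem] using this
      have hks : PySem.List.sorted (PySem.Set.ofList (xs.map key)) (fun x => x) false = l1 ++ key x :: l2 := by
        rw [← hadd, ← hset, hsplit]
      rw [hks, List.flatMap_append, List.flatMap_cons]
      simp only [List.append_assoc, List.singleton_append] at hins ⊢
      exact hins
    · -- new key: the old sorted key set is l1 ++ l2, and the key-x filter over xs is empty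
      have hadd : PySem.Set.add (PySem.Set.ofList (xs.map key)) (key x)
          = PySem.Set.ofList (xs.map key) ++ [key x] := by
        unfold PySem.Set.add
        rw [if_neg]
        intro hcon
        exact hc ((PySem.Set.mem_ofList _ _).1 (by
          unfold PySem.Set.contains at hcon
          simpa [List.contains_iff_mem] using hcon))
      have hperm : (l1 ++ l2).Perm (PySem.Set.ofList (xs.map key)) := by
        have p1 : (l1 ++ key x :: l2).Perm (PySem.Set.ofList (xs.map key) ++ [key x]) := by
          rw [← hsplit, hset, hadd]
          exact PySem.List.sorted_perm _ _ _
        have p2 : (PySem.Set.ofList (xs.map key) ++ [key x]).Perm (key x :: PySem.Set.ofList (xs.map key)) :=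
          List.perm_append_singleton _ _
        exact ((List.perm_middle.symm.trans p1).trans p2).cons_inv
      have hpw12 : (l1 ++ l2).Pairwise (fun a b => (a : Int) < b) := by
        rcases List.pairwise_append.1 hpw' with ⟨pa, pb, pab⟩
        exact List.pairwise_append.2 ⟨pa, (List.pairwise_cons.1 pb).2,
          fun a ha b hb => pab a ha b (List.mem_cons_of_mem _ hb)⟩
      have hks : PySem.List.sorted (PySem.Set.ofList (xs.map key)) (fun x => x) false = l1 ++ l2 :=
        PySem.List.sorted_eq_of_perm_of_pairwise_lt _ _ _ hperm hpw12
      have hfilt0 : xs.filter (fun i => key i == key x) = [] := by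
        rw [List.filter_eq_nil_iff]
        intro i hi hbeq
        have hkey : key i = key x := by simpa using hbeq
        exact hc (hkey ▸ List.mem_map_of_mem hi)
      rw [hks, List.flatMap_append]
      simp only [hfilt0, List.append_nil, List.nil_append,
        List.singleton_append] at hins ⊢
      exact hins

-- A's bucket step is Dict.modify
theorem pvStep_eq_modify (d : PySem.Dict Int (List String)) (i : String) :
    (if d.contains (pvKeyA i) then d.insert (pvKeyA i) (d.getD (pvKeyA i) [] ++ [i])
     else d.insert (pvKeyA i) [i]) = d.modify (pvKeyA i) [] (· ++ [i]) := by
  by_cases h : d.contains (pvKeyA i) = true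
  · simp [h, PySem.Dict.modify]
  · have h' : d.contains (pvKeyA i) = false := by simpa using h
    rw [if_neg (by simp [h']), PySem.Dict.modify, PySem.Dict.getD_of_not_contains d [] h']
    simp

-- A's whole pipeline is the grouped form of its key
theorem sortByInt_eq_grouped (array : List String) :
    sortByInt array =
      (PySem.List.sorted (PySem.Set.ofList (array.map pvKeyA)) (fun x => x) false).flatMap
        (fun k => array.filter (fun i => pvKeyA i == k)) := by
  have htable : array.foldl (fun (table : PySem.Dict Int (List String)) i =>
      if table.contains (pvKeyA i) then table.insert (pvKeyA i) (table.getD (pvKeyA i) [] ++ [i])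
      else table.insert (pvKeyA i) [i]) PySem.Dict.empty
      = array.foldl (fun d i => d.modify (pvKeyA i) [] (· ++ [i])) PySem.Dict.empty :=
    PySem.List.foldl_congr_mem (l := array) _ _ _ (fun d i _ => pvStep_eq_modify d i)
  have hkeys : (array.foldl (fun d i => d.modify (pvKeyA i) [] (· ++ [i])) PySem.Dict.empty).keys
      = PySem.Set.ofList (array.map pvKeyA) := by
    have h := PySem.Dict.keys_foldl_modify_key array pvKeyA [] (fun _ i v => v ++ [i]) PySem.Dict.empty
    simpa [PySem.Set.ofList_eq_foldl, PySem.Set.update] using h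
  have hgetD : ∀ k, (array.foldl (fun d i => d.modify (pvKeyA i) [] (· ++ [i])) PySem.Dict.empty).getD k []
      = array.filter (fun i => pvKeyA i == k) := by
    intro k
    have h0 := PySem.Dict.getD_foldl_modify_append (array.map (fun i => (pvKeyA i, i)))
      PySem.Dict.empty k
    rw [List.foldl_map] at h0
    simpa [List.filter_map, List.map_map, Function.comp_def] using h0
  unfold sortByInt
  simp only [htable, hkeys]
  rw [PySem.List.foldl_append_eq_flatMap]
  rw [List.flatMap_congr (fun k _ => hgetD k)]
  simp

-- ===== VERDICT (by name: the statement is the Claim_ definition above) =====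
theorem sortByInt_spec : Claim_equal_sortByInt := by
  intro array _hDom _hPre
  unfold Spec_sortByInt sortByInt_alt
  rw [sortByInt_eq_grouped array, funext pvKeyA_eq_pvKeyB]
  exact (pvSorted_eq_grouped pvKeyB array).symm
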